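-- pv_equiv track=rewrite | github.com/hannahghub123/LeetCode-Workouts | problems/fascinating.py | fascinating
-- ===== SOURCE A (Python) =====
-- def fascinating(n):
--
--     n = str(n)
--
--     n = sorted(list(n+ str(2*int(n)) + str(3*int(n))))
--     new_n = sorted(set(n))
--
--     value = False
--
--     if n == new_n and str(0) not in n:
--         value = all(str(i) in n for i in range(1, 10))
--
--     else:
--         return value
--
--     return value
-- ===== SOURCE B (Python) =====
-- def fascinating(n):
--     s = str(n) + str(2 * n) + str(3 * n)
--     if len(s) != 9:
--         return False
--     seen = set()
--     for ch in s:
--         if ch < '1' or ch > '9' or ch in seen: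
--             return False
--         seen.add(ch)
--     return True
-- ===== Notes on version B (the rewrite author's own statement) =====
-- stated objective: alternative
-- what changed: Replaces A's sort of the concatenation plus sorted-set comparison plus per-digit membership loop by a length check and a single left-to-right pass that rejects out-of-range characters and repeats via a set of already-seen digits.
import Mathlib
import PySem

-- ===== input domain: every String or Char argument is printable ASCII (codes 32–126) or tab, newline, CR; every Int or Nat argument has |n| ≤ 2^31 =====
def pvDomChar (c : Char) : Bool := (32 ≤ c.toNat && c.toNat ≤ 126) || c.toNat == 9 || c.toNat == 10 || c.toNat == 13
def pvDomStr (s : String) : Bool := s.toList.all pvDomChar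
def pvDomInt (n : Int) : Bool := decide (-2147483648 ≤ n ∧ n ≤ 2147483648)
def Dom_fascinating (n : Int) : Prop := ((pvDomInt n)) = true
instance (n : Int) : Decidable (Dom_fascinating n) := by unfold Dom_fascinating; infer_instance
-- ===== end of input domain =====

-- B replaces A's sort + sorted-set comparison + digit-membership loop by one pass over the
-- concatenation with a set of seen digits (alternative decomposition, same cost on 9 chars).

-- ===== PORT A =====
-- str(i) for a single-digit i, as the Char it consists of (list(<string>) elements are chars here)
def digitStr (i : Int) : Char := (PySem.Int.toChars i).headD ' '

def fascinating (n : Int) : Bool :=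
  -- n = str(n); int(n) parses that very string back, so 2*int(n) / 3*int(n) denote 2*n / 3*n
  let s := PySem.Int.toChars n
  let l := PySem.List.sorted (s ++ PySem.Int.toChars (2 * n) ++ PySem.Int.toChars (3 * n))
      (fun c => c) false
  let new_n := PySem.List.sorted (PySem.Set.ofList l) (fun c => c) false
  if l = new_n ∧ digitStr 0 ∉ l then
    (PySem.List.pyRange 1 10 1).all (fun i => decide (digitStr i ∈ l))
  else
    false

-- ===== PORT B =====
def altLoop : List Char → PySem.Set Char → Bool
  | [], _ => true
  | ch :: rest, seen =>
    if ch < '1' ∨ '9' < ch ∨ PySem.Set.contains seen ch then false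
    else altLoop rest (PySem.Set.add seen ch)

def fascinating_alt (n : Int) : Bool :=
  let s := PySem.Int.toChars n ++ PySem.Int.toChars (2 * n) ++ PySem.Int.toChars (3 * n)
  if PySem.List.len s ≠ 9 then false
  else altLoop s PySem.Set.empty

-- ===== PRECONDITION & SPEC =====
def Spec_fascinating (n : Int) (out : Bool) : Prop := out = fascinating_alt n
instance (n : Int) (out : Bool) : Decidable (Spec_fascinating n out) := by unfold Spec_fascinating; infer_instance

-- ===== CLAIM (what is proved, stated in full; the proofs are below) =====
def Claim_equal_fascinating : Prop := ∀ (n : Int), Dom_fascinating n → Spec_fascinating n (fascinating n)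

-- ===== LEMMAS AND PROOFS =====

def DIG10 : List Char := ['0', '1', '2', '3', '4', '5', '6', '7', '8', '9']
def DIG19 : List Char := ['1', '2', '3', '4', '5', '6', '7', '8', '9']

lemma digitChar_mem (m : Nat) (h : m < 10) : Nat.digitChar m ∈ DIG10 := by
  interval_cases m <;> decide

lemma toDigitsCore_mem (f : Nat) : ∀ (n : Nat) (acc : List Char) (c : Char),
    c ∈ Nat.toDigitsCore 10 f n acc → c ∈ acc ∨ c ∈ DIG10 := by
  induction f with
  | zero => intro n acc c h; rw [Nat.toDigitsCore] at h; exact Or.inl h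
  | succ f ih =>
    intro n acc c h
    rw [Nat.toDigitsCore] at h
    by_cases hz : n / 10 = 0
    · simp only [hz, if_pos] at h
      rcases List.mem_cons.1 h with rfl | h
      · exact Or.inr (digitChar_mem _ (Nat.mod_lt _ (by norm_num)))
      · exact Or.inl h
    · simp only [hz, if_false] at h
      rcases ih _ _ _ h with h' | h'
      · rcases List.mem_cons.1 h' with rfl | h''
        · exact Or.inr (digitChar_mem _ (Nat.mod_lt _ (by norm_num)))
        · exact Or.inl h''
      · exact Or.inr h'

lemma mem_toChars {k : Int} {c : Char} (h : c ∈ PySem.Int.toChars k) : c = '-' ∨ c ∈ DIG10 := by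
  unfold PySem.Int.toChars at h
  split at h
  · rcases List.mem_cons.1 h with rfl | h'
    · exact Or.inl rfl
    · rcases toDigitsCore_mem _ _ _ _ h' with h'' | h''
      · cases h''
      · exact Or.inr h''
  · rcases toDigitsCore_mem _ _ _ _ h with h'' | h''
    · cases h''
    · exact Or.inr h''

lemma minus_mem_toChars {k : Int} (h : k < 0) : '-' ∈ PySem.Int.toChars k := by
  unfold PySem.Int.toChars
  rw [if_pos h]; exact List.mem_cons_self

lemma neg_of_minus_mem {k : Int} (h : '-' ∈ PySem.Int.toChars k) : k < 0 := by
  by_contra hk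
  unfold PySem.Int.toChars at h
  rw [if_neg hk] at h
  rcases toDigitsCore_mem _ _ _ _ h with h' | h'
  · cases h'
  · simp [DIG10] at h'

lemma altLoop_spec : ∀ (cs : List Char) (seen : PySem.Set Char),
    altLoop cs seen = true ↔
      ((∀ c ∈ cs, ('1' ≤ c ∧ c ≤ '9') ∧ c ∉ (seen : List Char)) ∧ cs.Nodup) := by
  intro cs
  induction cs with
  | nil => intro seen; simp [altLoop]
  | cons c rest ih =>
    intro seen
    rw [altLoop]
    by_cases hbad : c < '1' ∨ '9' < c ∨ PySem.Set.contains seen c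
    · rw [if_pos hbad]
      simp only [Bool.false_eq_true, false_iff]
      rintro ⟨hall, _⟩
      rcases hall c List.mem_cons_self with ⟨⟨h1, h2⟩, h3⟩
      rcases hbad with h | h | h
      · exact absurd h1 (not_le.2 h)
      · exact absurd h2 (not_le.2 h)
      · exact h3 (by simpa [PySem.Set.contains] using h)
    · rw [if_neg hbad]
      simp only [not_or, not_lt] at hbad
      obtain ⟨h1, h2, h3⟩ := hbad
      rw [ih, List.nodup_cons]
      constructor
      · rintro ⟨hall, hnd⟩
        refine ⟨?_, ?_, hnd⟩
        · intro x hx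
          rcases List.mem_cons.1 hx with rfl | hx'
          · exact ⟨⟨h1, h2⟩, by simpa [PySem.Set.contains] using h3⟩
          · rcases hall x hx' with ⟨hr, hm⟩
            exact ⟨hr, fun hmem => hm ((PySem.Set.mem_add seen c x).2 (Or.inl hmem))⟩
        · intro hc
          rcases hall c hc with ⟨_, hm⟩
          exact hm ((PySem.Set.mem_add seen c c).2 (Or.inr rfl))
      · rintro ⟨hall, hnotmem, hnd⟩
        refine ⟨?_, hnd⟩
        intro x hx
        rcases hall x (List.mem_cons_of_mem _ hx) with ⟨hr, hm⟩
        refine ⟨hr, fun hmem => ?_⟩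
        rcases (PySem.Set.mem_add seen c x).1 hmem with h' | rfl
        · exact hm h'
        · exact hnotmem hx

lemma sorted_eq_sorted_ofList_iff (L : List Char) :
    (PySem.List.sorted L (fun c => c) false =
      PySem.List.sorted (PySem.Set.ofList (PySem.List.sorted L (fun c => c) false)) (fun c => c) false)
      ↔ L.Nodup := by
  set l := PySem.List.sorted L (fun c => c) false with hl
  have hnodupiff : l.Nodup ↔ L.Nodup := (PySem.List.sorted_perm L (fun c => c) false).nodup_iff
  rw [← PySem.List.dedup_eq_ofList]
  constructor
  · intro he
    have h1 : PySem.List.sorted l (fun c => c) false = l := by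
      rw [hl]; exact PySem.List.sorted_sorted L (fun c => c)
    conv at he => lhs; rw [← h1]
    have hperm : l.Perm (PySem.List.dedup l) :=
      (PySem.List.sorted_id_eq_sorted_id_iff_perm l (PySem.List.dedup l)).1 he
    exact hnodupiff.1 (hperm.nodup_iff.2 (PySem.List.nodup_dedup l))
  · intro hnd
    have hndl : l.Nodup := hnodupiff.2 hnd
    have hperm : l.Perm (PySem.List.dedup l) :=
      List.perm_of_nodup_nodup_toFinset_eq hndl (PySem.List.nodup_dedup l) (by
        ext x
        simp only [List.mem_toFinset, PySem.List.mem_dedup])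
    have := (PySem.List.sorted_id_eq_sorted_id_iff_perm l (PySem.List.dedup l)).2 hperm
    rw [PySem.List.sorted_sorted L (fun c => c)] at this
    exact this

lemma key_iff (L : List Char) (halpha : ∀ c ∈ L, c = '-' ∨ c ∈ DIG10)
    (hminus : '-' ∈ L → ¬ L.Nodup) :
    (L.Nodup ∧ '0' ∉ L ∧ ∀ d ∈ DIG19, d ∈ L) ↔
    (L.length = 9 ∧ (∀ c ∈ L, '1' ≤ c ∧ c ≤ '9') ∧ L.Nodup) := by
  constructor
  · rintro ⟨hnd, h0, hsup⟩
    have hrange : ∀ c ∈ L, '1' ≤ c ∧ c ≤ '9' := by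
      intro c hc
      rcases halpha c hc with rfl | hd
      · exact absurd hnd (hminus hc)
      · have hne : c ≠ '0' := fun h => h0 (h ▸ hc)
        simp only [DIG10, List.mem_cons, List.not_mem_nil, or_false] at hd
        rcases hd with rfl|rfl|rfl|rfl|rfl|rfl|rfl|rfl|rfl|rfl <;> revert hne <;> decide
    have hsub : ∀ c ∈ L, c ∈ DIG19 := by
      intro c hc
      have hr := hrange c hc
      rcases halpha c hc with rfl | hd
      · revert hr; decide
      · simp only [DIG10, List.mem_cons, List.not_mem_nil, or_false] at hd
        rcases hd with rfl|rfl|rfl|rfl|rfl|rfl|rfl|rfl|rfl|rfl <;> revert hr <;> decide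
    have hperm : L.Perm DIG19 :=
      List.perm_of_nodup_nodup_toFinset_eq hnd (by decide) (by
        ext x
        simp only [List.mem_toFinset]
        exact ⟨fun h => hsub x h, fun h => hsup x h⟩)
    exact ⟨hperm.length_eq.trans (by decide), hrange, hnd⟩
  · rintro ⟨hlen, hrange, hnd⟩
    have hsub : ∀ c ∈ L, c ∈ DIG19 := by
      intro c hc
      have hr := hrange c hc
      rcases halpha c hc with rfl | hd
      · revert hr; decide
      · simp only [DIG10, List.mem_cons, List.not_mem_nil, or_false] at hd
        rcases hd with rfl|rfl|rfl|rfl|rfl|rfl|rfl|rfl|rfl|rfl <;> revert hr <;> decide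
    have h0 : '0' ∉ L := fun h => by have := hrange _ h; revert this; decide
    have hcard : L.toFinset.card = 9 := by
      rw [List.toFinset_card_of_nodup hnd, hlen]
    have hsubF : L.toFinset ⊆ DIG19.toFinset := fun x hx =>
      List.mem_toFinset.2 (hsub x (List.mem_toFinset.1 hx))
    have heq : L.toFinset = DIG19.toFinset :=
      Finset.eq_of_subset_of_card_le hsubF (by rw [hcard]; decide)
    refine ⟨hnd, h0, fun d hd => ?_⟩
    have : d ∈ L.toFinset := heq ▸ List.mem_toFinset.2 hd
    exact List.mem_toFinset.1 this

theorem fascinating_spec : Claim_equal_fascinating := by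
  intro n _
  unfold Spec_fascinating fascinating fascinating_alt
  simp only []
  set L := PySem.Int.toChars n ++ PySem.Int.toChars (2 * n) ++ PySem.Int.toChars (3 * n) with hLdef
  set l := PySem.List.sorted L (fun c => c) false with hldef
  have halpha : ∀ c ∈ L, c = '-' ∨ c ∈ DIG10 := by
    intro c hc
    rw [hLdef] at hc
    rcases List.mem_append.1 hc with hc' | hc'
    · rcases List.mem_append.1 hc' with hc'' | hc''
      · exact mem_toChars hc''
      · exact mem_toChars hc''
    · exact mem_toChars hc'
  have hminus : '-' ∈ L → ¬ L.Nodup := by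
    intro hm hnd
    have hneg : n < 0 := by
      rw [hLdef] at hm
      rcases List.mem_append.1 hm with hm' | hm'
      · rcases List.mem_append.1 hm' with hm'' | hm''
        · exact neg_of_minus_mem hm''
        · have := neg_of_minus_mem hm''; omega
      · have := neg_of_minus_mem hm'; omega
    have h1 : '-' ∈ PySem.Int.toChars n := minus_mem_toChars hneg
    have h2 : '-' ∈ PySem.Int.toChars (2 * n) := minus_mem_toChars (by omega)
    rw [hLdef] at hnd
    have h12 := (List.nodup_append.1 (List.nodup_append.1 hnd).1)
    exact h12.2.2 '-' h1 '-' h2 rfl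
  have hsort := sorted_eq_sorted_ofList_iff L
  rw [← hldef] at hsort
  have hmem : ∀ c : Char, c ∈ l ↔ c ∈ L := fun c => PySem.List.mem_sorted L (fun c => c) false c
  have hrange9 : PySem.List.pyRange 1 10 1 = [1, 2, 3, 4, 5, 6, 7, 8, 9] := by decide
  have hAall : (PySem.List.pyRange 1 10 1).all (fun i => decide (digitStr i ∈ l)) = true
      ↔ (∀ d ∈ DIG19, d ∈ L) := by
    rw [hrange9]
    simp only [List.all_cons, List.all_nil, Bool.and_eq_true, decide_eq_true_eq, Bool.and_true]
    rw [show digitStr 1 = '1' from by decide, show digitStr 2 = '2' from by decide,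
        show digitStr 3 = '3' from by decide, show digitStr 4 = '4' from by decide,
        show digitStr 5 = '5' from by decide, show digitStr 6 = '6' from by decide,
        show digitStr 7 = '7' from by decide, show digitStr 8 = '8' from by decide,
        show digitStr 9 = '9' from by decide]
    simp only [hmem, DIG19, List.forall_mem_cons]
    tauto
  have hd0 : digitStr 0 = '0' := by decide
  have hbool : ∀ a b : Bool, (a = true ↔ b = true) → a = b := by decide
  apply hbool
  constructor
  · intro hAtrue
    split at hAtrue
    next hc =>
      have hnd : L.Nodup := hsort.1 hc.1
      have h0 : '0' ∉ L := fun h => hc.2 (hd0 ▸ (hmem '0').2 h)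
      have hall := hAall.1 hAtrue
      have hkey := (key_iff L halpha hminus).1 ⟨hnd, h0, hall⟩
      obtain ⟨hlen, hrange, _⟩ := hkey
      rw [if_neg (by simp [PySem.List.len_eq, hlen])]
      rw [altLoop_spec]
      exact ⟨fun c hc' => ⟨hrange c hc', by simp [PySem.Set.empty]⟩, hnd⟩
    next => cases hAtrue
  · intro hBtrue
    split at hBtrue
    next => cases hBtrue
    next hl9 =>
      have hlen : L.length = 9 := by
        simp only [PySem.List.len_eq, not_not] at hl9
        exact_mod_cast hl9
      rw [altLoop_spec] at hBtrue
      obtain ⟨hall, hnd⟩ := hBtrue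
      have hrange : ∀ c ∈ L, '1' ≤ c ∧ c ≤ '9' := fun c hc' => (hall c hc').1
      have hkey := (key_iff L halpha hminus).2 ⟨hlen, hrange, hnd⟩
      obtain ⟨hnd', h0, hsup⟩ := hkey
      rw [if_pos ⟨hsort.2 hnd', fun h => h0 ((hmem '0').1 (hd0 ▸ h))⟩]
      exact hAall.2 hsup
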